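-- pv_equiv track=rewrite | github.com/AlexPTerry/AdventOfCode2024 | day09/part1.py | get_front
-- ===== SOURCE A (Python) =====
-- def get_front(n, numbers):
--     if len(numbers) == 0:
--         return []
--     if n < numbers[0][1]:
--         numbers[0][1] -= n
--         return [(n, numbers[0][0])]
--     elif n == numbers[0][1]:
--         final_val = numbers[0][0]
--         del numbers[0]
--         return [(n, final_val)]
--     else:
--         num_end = numbers[0][1]
--         final_val = numbers[0][0]
--         del numbers[0]
--         return [(num_end, final_val)] + get_front(n-num_end, numbers)
-- ===== SOURCE B (Python) =====
-- def get_front(n, numbers):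
--     # Iterative rewrite with an accumulator; performs the same in-place
--     # mutation of `numbers` (decrement / del of the front entry) as A.
--     result = []
--     while numbers:
--         val = numbers[0][0]
--         count = numbers[0][1]
--         if n <= count:
--             if n == count:
--                 del numbers[0]
--             else:
--                 numbers[0][1] -= n
--             result.append((n, val))
--             return result
--         del numbers[0]
--         result.append((count, val))
--         n -= count
--     return result
-- ===== Notes on version B (the rewrite author's own statement) =====
-- stated objective: simpler
-- what changed: Replaces A's list-building recursion by an iterative while-loop over the front of the list with a result accumulator, merging the n<count and n==count branches.
import Mathlib
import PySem

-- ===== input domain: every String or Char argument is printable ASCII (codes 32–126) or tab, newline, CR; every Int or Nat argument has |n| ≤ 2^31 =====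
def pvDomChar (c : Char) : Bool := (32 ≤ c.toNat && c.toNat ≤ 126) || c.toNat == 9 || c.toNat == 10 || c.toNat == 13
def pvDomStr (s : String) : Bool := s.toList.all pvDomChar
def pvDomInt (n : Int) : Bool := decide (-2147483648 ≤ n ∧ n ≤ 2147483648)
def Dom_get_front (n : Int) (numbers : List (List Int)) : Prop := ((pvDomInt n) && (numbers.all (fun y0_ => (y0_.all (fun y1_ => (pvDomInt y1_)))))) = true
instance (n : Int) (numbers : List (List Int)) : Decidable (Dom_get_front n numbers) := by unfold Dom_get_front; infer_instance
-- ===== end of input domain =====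

-- B is an iterative accumulator loop instead of A's recursion (objective: simpler).
-- Both Pythons mutate `numbers` identically in place; the equivalence proved here is about the RETURN value.

-- ===== PORT A =====
-- A's recursion: `del numbers[0]` + recursive call becomes recursion on the tail.
def get_front (n : Int) (numbers : List (List Int)) : List (Int × Int) :=
  match numbers with
  | [] => []
  | x :: rest =>
    let c := (PySem.List.pyGet? x 1).getD 0   -- numbers[0][1]; some under Pre_
    let v := (PySem.List.pyGet? x 0).getD 0   -- numbers[0][0]
    if n < c then [(n, v)]
    else if n = c then [(n, v)]
    else (c, v) :: get_front (n - c) rest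

-- ===== PORT B =====
-- B's while-loop with the `result` accumulator (append = acc ++ [·]).
def get_front_alt_loop (n : Int) (numbers : List (List Int)) (acc : List (Int × Int)) : List (Int × Int) :=
  match numbers with
  | [] => acc
  | x :: rest =>
    let v := (PySem.List.pyGet? x 0).getD 0
    let c := (PySem.List.pyGet? x 1).getD 0
    if n ≤ c then acc ++ [(n, v)]
    else get_front_alt_loop (n - c) rest (acc ++ [(c, v)])

def get_front_alt (n : Int) (numbers : List (List Int)) : List (Int × Int) :=
  get_front_alt_loop n numbers []

-- ===== PRECONDITION & SPEC =====
-- Pre_ holds exactly where Python A returns: A raises IndexError iff the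
-- recursion reaches an entry with fewer than 2 elements; an entry i is reached
-- iff every earlier prefix-sum of the counts stays below n.
def Pre_get_front (n : Int) (numbers : List (List Int)) : Prop :=
  ∀ i < numbers.length,
    (∀ j < i, ((numbers.take (j+1)).map (fun l => (PySem.List.pyGet? l 1).getD 0)).sum < n) →
    2 ≤ (numbers.getD i []).length
instance (n : Int) (numbers : List (List Int)) : Decidable (Pre_get_front n numbers) := by unfold Pre_get_front; infer_instance

def pvWitness_get_front : Int × List (List Int) := (7, [[3, 4], [5, 6]])

def Spec_get_front (n : Int) (numbers : List (List Int)) (out : List (Int × Int)) : Prop := out = get_front_alt n numbers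
instance (n : Int) (numbers : List (List Int)) (out : List (Int × Int)) : Decidable (Spec_get_front n numbers out) := by unfold Spec_get_front; infer_instance

-- ===== CLAIM (what is proved, stated in full; the proofs are below) =====
def Claim_equal_get_front : Prop := ∀ (n : Int) (numbers : List (List Int)), Dom_get_front n numbers → Pre_get_front n numbers → Spec_get_front n numbers (get_front n numbers)

-- ===== LEMMAS AND PROOFS =====
lemma get_front_loop_eq (numbers : List (List Int)) :
    ∀ (n : Int) (acc : List (Int × Int)),
      get_front_alt_loop n numbers acc = acc ++ get_front n numbers := by
  induction numbers with
  | nil => intro n acc; simp [get_front_alt_loop, get_front]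
  | cons x rest ih =>
    intro n acc
    simp only [get_front_alt_loop, get_front]
    rcases lt_trichotomy n ((PySem.List.pyGet? x 1).getD 0) with h | h | h
    · rw [if_pos (le_of_lt h), if_pos h]
    · rw [if_pos (le_of_eq h), if_neg (by omega), if_pos h]
    · rw [if_neg (by omega), if_neg (by omega), if_neg (by omega), ih]
      simp

-- ===== VERDICT (by name: the statement is the Claim_ definition above) =====
theorem get_front_spec : Claim_equal_get_front := by
  intro n numbers _ _
  unfold Spec_get_front get_front_alt
  rw [get_front_loop_eq]
  simp
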